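-- pv_equiv track=rewrite | github.com/JoseRPrietoF/ImageClassification | acts/get_results_groups_page_chancery.py | restore_groups
-- ===== SOURCE A (Python) =====
-- def restore_groups(v_acts, acts):
--     res = {}
--     for group, v_group in zip(acts, v_acts):
--         group_name = "_".join(group[0].split("_")[:2])
--         list_g = res.get(group_name, [])
--         list_g.append((group, v_group))
--         res[group_name] = list_g
--     return res
-- ===== SOURCE B (Python) =====
-- def restore_groups(v_acts, acts):
--     pairs = list(zip(acts, v_acts))
--     keys = []
--     for group, _ in pairs:
--         k = "_".join(group[0].split("_")[:2])
--         if k not in keys: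
--             keys.append(k)
--     return {k: [p for p in pairs if "_".join(p[0][0].split("_")[:2]) == k]
--             for k in keys}
-- ===== Notes on version B (the rewrite author's own statement) =====
-- stated objective: alternative
-- what changed: Replaces A's incremental dict accumulation with a two-pass grouping: first collect the distinct group keys in first-occurrence order, then build each group with one filter pass over the zipped pairs.
import Mathlib
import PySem

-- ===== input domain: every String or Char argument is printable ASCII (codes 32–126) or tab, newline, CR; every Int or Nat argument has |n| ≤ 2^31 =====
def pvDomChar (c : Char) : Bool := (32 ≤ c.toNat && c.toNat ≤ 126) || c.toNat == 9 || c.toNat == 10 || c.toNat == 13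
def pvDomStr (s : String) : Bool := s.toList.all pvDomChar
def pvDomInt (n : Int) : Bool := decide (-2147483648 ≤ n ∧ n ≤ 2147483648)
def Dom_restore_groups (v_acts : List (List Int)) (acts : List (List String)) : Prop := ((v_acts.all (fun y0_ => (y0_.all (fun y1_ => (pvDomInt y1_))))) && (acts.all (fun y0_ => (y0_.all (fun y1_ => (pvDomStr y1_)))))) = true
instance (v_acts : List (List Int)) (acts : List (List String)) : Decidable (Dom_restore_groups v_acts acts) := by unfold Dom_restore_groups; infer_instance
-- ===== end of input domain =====

-- B replaces A's incremental dict accumulation with a two-pass grouping (distinct keys first,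
-- then one filter per key); alternative decomposition, same return value on Pre_.


-- group_name = "_".join(group[0].split("_")[:2])  (shared by both Pythons verbatim;
-- group[0] on an empty group raises IndexError in Python — excluded by Pre_; the port defaults to "")
def pvGroupName (group : List String) : String :=
  PySem.Str.join "_" (((PySem.Str.split? ((PySem.List.pyGet? group 0).getD "") "_").getD []).take 2)

-- ===== PORT A =====
-- res = {}; for group, v_group in zip(acts, v_acts): … res[group_name] = res.get(group_name, []) + [(group, v_group)]; return res
def restore_groups (v_acts : List (List Int)) (acts : List (List String)) : List (String × List (List String × List Int)) :=
  ((acts.zip v_acts).foldl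
    (fun (res : PySem.Dict String (List (List String × List Int))) p =>
      let group_name := pvGroupName p.1
      let list_g := res.getD group_name []
      res.insert group_name (list_g ++ [p]))
    PySem.Dict.empty).items

-- ===== PORT B =====
-- pairs = list(zip(acts, v_acts)); keys = first-occurrence dedup of the group names;
-- return {k: [p for p in pairs if name(p) == k] for k in keys}
def restore_groups_alt (v_acts : List (List Int)) (acts : List (List String)) : List (String × List (List String × List Int)) :=
  let pairs := acts.zip v_acts
  let keys : PySem.Set String := pairs.foldl (fun ks p => PySem.Set.add ks (pvGroupName p.1)) []
  keys.map (fun k => (k, pairs.filter (fun p => pvGroupName p.1 == k)))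

-- ===== PRECONDITION & SPEC =====
-- Pre_ excludes exactly the inputs where some zipped group is the empty list: there group[0] raises IndexError in A.
def Pre_restore_groups (v_acts : List (List Int)) (acts : List (List String)) : Prop :=
  ∀ p ∈ acts.zip v_acts, p.1 ≠ []
instance (v_acts : List (List Int)) (acts : List (List String)) : Decidable (Pre_restore_groups v_acts acts) := by unfold Pre_restore_groups; infer_instance
def pvWitness_restore_groups : List (List Int) × List (List String) :=
  ([[1, 2], [3], [4]], [["a_b_c", "x"], ["a_b_d"], ["e_f"]])
def Spec_restore_groups (v_acts : List (List Int)) (acts : List (List String)) (out : List (String × List (List String × List Int))) : Prop := out = restore_groups_alt v_acts acts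
instance (v_acts : List (List Int)) (acts : List (List String)) (out : List (String × List (List String × List Int))) : Decidable (Spec_restore_groups v_acts acts out) := by unfold Spec_restore_groups; infer_instance

-- ===== CLAIM (what is proved, stated in full; the proofs are below) =====
def Claim_equal_restore_groups : Prop := ∀ (v_acts : List (List Int)) (acts : List (List String)), Dom_restore_groups v_acts acts → Pre_restore_groups v_acts acts → Spec_restore_groups v_acts acts (restore_groups v_acts acts)

-- ===== LEMMAS AND PROOFS =====

-- A's grouping loop, characterised: the items of the accumulated dict are the distinct keys
-- (first-occurrence order), each paired with the filter of its elements.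
theorem pv_groups_items {P : Type} (key : P → String) (pairs : List P) :
    ((pairs.foldl
        (fun (res : PySem.Dict String (List P)) p =>
          res.insert (key p) (res.getD (key p) [] ++ [p]))
        PySem.Dict.empty).items)
      = (PySem.Set.ofList (pairs.map key)).map
          (fun k => (k, pairs.filter (fun p => key p == k))) := by
  induction pairs using List.reverseRecOn with
  | nil => rfl
  | append_singleton pairs p ih =>
    have hkeys :
        ((pairs.foldl
            (fun (res : PySem.Dict String (List P)) p =>
              res.insert (key p) (res.getD (key p) [] ++ [p]))
            PySem.Dict.empty).keys)
          = PySem.Set.ofList (pairs.map key) := by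
      rw [PySem.Dict.keys_foldl_insert_key]
      simp [PySem.Set.update, PySem.Set.ofList_eq_foldl, PySem.Dict.keys_empty]
    have hnodup :
        ((pairs.foldl
            (fun (res : PySem.Dict String (List P)) p =>
              res.insert (key p) (res.getD (key p) [] ++ [p]))
            PySem.Dict.empty).keys).Nodup := by
      rw [hkeys]; exact PySem.Set.nodup_ofList _
    rw [List.foldl_append, List.foldl_cons, List.foldl_nil]
    rw [List.map_append, List.map_singleton]
    set d := pairs.foldl
        (fun (res : PySem.Dict String (List P)) p =>
          res.insert (key p) (res.getD (key p) [] ++ [p]))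
        PySem.Dict.empty with hd
    have hofl : PySem.Set.ofList (pairs.map key ++ [key p])
        = PySem.Set.add (PySem.Set.ofList (pairs.map key)) (key p) := by
      simp [PySem.Set.ofList_eq_foldl, List.foldl_append]
    by_cases hmem : key p ∈ pairs.map key
    · -- key already present: insert rewrites that entry in place
      have hcont : d.contains (key p) = true := by
        rw [PySem.Dict.contains_iff_mem_keys, hkeys]
        exact (PySem.Set.mem_ofList _ _).mpr hmem
      have hitem : (key p, pairs.filter (fun q => key q == key p)) ∈ d.items := by
        rw [ih]
        exact List.mem_map.mpr ⟨key p, (PySem.Set.mem_ofList _ _).mpr hmem, rfl⟩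
      have hgetD : d.getD (key p) [] = pairs.filter (fun q => key q == key p) :=
        PySem.Dict.getD_of_mem_items d hitem hnodup []
      rw [PySem.Dict.items_insert_of_contains d _ hcont, ih, hgetD, hofl,
        PySem.Set.add_of_mem ((PySem.Set.mem_ofList _ _).mpr hmem), List.map_map]
      apply List.map_congr_left
      intro k hk
      simp only [Function.comp]
      by_cases hkp : k = key p
      · subst hkp; simp [List.filter_append]
      · have : (key p == k) = false := by simp [Ne.symm hkp]
        simp [List.filter_append, this, hkp]
    · -- fresh key: insert appends a new entry
      have hcont : d.contains (key p) = false := by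
        rw [← Bool.not_eq_true, PySem.Dict.contains_iff_mem_keys, hkeys,
          PySem.Set.mem_ofList]
        exact hmem
      have hgetD : d.getD (key p) [] = [] := PySem.Dict.getD_of_not_contains d [] hcont
      rw [PySem.Dict.items_insert_of_not_contains d _ hcont, ih, hgetD, hofl,
        PySem.Set.add_of_not_mem (by rw [PySem.Set.mem_ofList]; exact hmem),
        List.map_append, List.map_singleton]
      congr 1
      · apply List.map_congr_left
        intro k hk
        have hk' : k ∈ pairs.map key := (PySem.Set.mem_ofList _ _).mp hk
        have : (key p == k) = false := by
          simp only [beq_eq_false_iff_ne, ne_eq]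
          rintro rfl; exact hmem hk'
        simp [List.filter_append, this]
      · have hfilt : pairs.filter (fun q => key q == key p) = [] := by
          rw [List.filter_eq_nil_iff]
          intro q hq
          simp only [beq_iff_eq]
          intro hkq
          exact hmem (hkq ▸ List.mem_map_of_mem hq)
        simp [List.filter_append, hfilt]

-- B's first pass builds exactly set-of-list of the mapped keys.
theorem pv_keys_fold {P : Type} (key : P → String) (pairs : List P) :
    pairs.foldl (fun (ks : PySem.Set String) p => PySem.Set.add ks (key p)) []
      = PySem.Set.ofList (pairs.map key) := by
  simp [PySem.Set.ofList_eq_foldl, List.foldl_map]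

-- ===== VERDICT (by name: the statement is the Claim_ definition above) =====
theorem restore_groups_spec : Claim_equal_restore_groups := by
  intro v_acts acts _ _
  simp only [Spec_restore_groups, restore_groups, restore_groups_alt]
  rw [pv_keys_fold, pv_groups_items]
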